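-- pv_equiv track=rewrite | github.com/meta-prompting/meta-prompting | Math/infer/inference.py | extract_questions_up_to_nth
-- ===== SOURCE A (Python) =====
-- def extract_questions_up_to_nth(string, phrase, n):
--     """
--     Extracts and returns the text containing questions and their answers from the 1st to the nth occurrence of a specified phrase in a string.
--     If the nth occurrence does not exist, returns the text up to the last occurrence of the phrase.
--
--     :param string: The input string to be searched.
--     :param phrase: The phrase to search for ('Question:').
--     :param n: The upper limit (nth occurrence) of the phrase to be extracted.
--     :return: A string containing the text of the questions and answers up to the nth occurrence.
--     """
--     current_index = 0
--     for _ in range(n):  # Loop n times to find the nth occurrence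
--         next_index = string.find(phrase, current_index)
--         if next_index == -1:  # If the phrase is not found
--             return string[:current_index]  # Return the string up to the last occurrence
--         current_index = next_index + len(phrase)  # Move past the current occurrence
--
--     # Return the substring up to the start of the next question (or end of string if no more questions)
--     next_question_start = string.find(phrase, current_index)
--     return string[:next_question_start] if next_question_start != -1 else string
-- ===== SOURCE B (Python) =====
-- def extract_questions_up_to_nth(string, phrase, n):
--     # Split-based: let str.split do the scanning, then reassemble with join.
--     if not phrase:
--         return ""  # an empty phrase "occurs" at position 0; the text before it is empty
--     parts = string.split(phrase)
--     k = len(parts) - 1  # number of occurrences of phrase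
--     m = max(n, 0)
--     if k > m:
--         return phrase.join(parts[:m + 1])
--     if k == m:
--         return string
--     if k == 0:
--         return ""
--     return phrase.join(parts[:k]) + phrase
-- ===== Notes on version B (the rewrite author's own statement) =====
-- stated objective: alternative
-- what changed: B replaces A's find-and-advance scan with string.split(phrase) and reassembles the answer with phrase.join, selecting by comparing the occurrence count (len(parts)-1) against n; an explicit empty-phrase guard replaces A's find-on-empty behaviour.
import Mathlib
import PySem

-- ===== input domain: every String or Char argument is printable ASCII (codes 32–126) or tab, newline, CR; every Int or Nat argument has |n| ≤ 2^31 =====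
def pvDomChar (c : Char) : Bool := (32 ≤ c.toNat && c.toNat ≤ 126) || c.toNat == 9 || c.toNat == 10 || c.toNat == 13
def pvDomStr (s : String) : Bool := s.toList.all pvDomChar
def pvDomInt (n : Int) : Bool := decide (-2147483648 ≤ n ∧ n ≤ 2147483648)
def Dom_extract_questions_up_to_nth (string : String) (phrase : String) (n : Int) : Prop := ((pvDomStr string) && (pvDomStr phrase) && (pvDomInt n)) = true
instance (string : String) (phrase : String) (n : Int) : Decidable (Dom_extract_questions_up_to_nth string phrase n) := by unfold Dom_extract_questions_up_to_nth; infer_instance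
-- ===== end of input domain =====

-- B re-implements the extraction via string.split(phrase) + phrase.join instead of A's
-- find-and-advance scan; alternative decomposition, same asymptotic cost.


-- ===== PORT A =====
-- A's loop 'for _ in range(n)' with early return, as recursion on the remaining
-- iteration count; the fuel-0 case is A's code after the loop.
def pvA_loop (string : String) (phrase : String) (current : Int) : Nat → String
  | 0 =>
    let next_question_start := PySem.Str.findFrom string phrase current
    if next_question_start ≠ -1 then PySem.Str.slice string none (some next_question_start)
    else string
  | k + 1 =>
    let next_index := PySem.Str.findFrom string phrase current
    if next_index = -1 then PySem.Str.slice string none (some current)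
    else pvA_loop string phrase (next_index + PySem.Str.len phrase) k

def extract_questions_up_to_nth (string : String) (phrase : String) (n : Int) : String :=
  pvA_loop string phrase 0 n.toNat

-- ===== PORT B =====
-- Source B ported on List Char: string.split(phrase) with phrase ≠ '' is PySem.Chars.splitOn
-- on .toList (Str.split? is its Option wrapper), phrase.join is PySem.Chars.join, and
-- parts[:i] / '+' are PySem.List.slice / list append; String.ofList rebuilds the String.
def extract_questions_up_to_nth_alt (string : String) (phrase : String) (n : Int) : String :=
  if phrase == "" then ""   -- if not phrase: return ""
  else
    let parts := PySem.Chars.splitOn string.toList phrase.toList   -- string.split(phrase)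
    let k : Int := (parts.length : Int) - 1
    let m : Int := max n 0
    if k > m then
      String.ofList (PySem.Chars.join phrase.toList (PySem.List.slice parts none (some (m + 1))))
    else if k = m then string
    else if k = 0 then ""
    else
      String.ofList (PySem.Chars.join phrase.toList (PySem.List.slice parts none (some k)) ++ phrase.toList)

-- ===== PRECONDITION & SPEC =====
def Spec_extract_questions_up_to_nth (string : String) (phrase : String) (n : Int) (out : String) : Prop := out = extract_questions_up_to_nth_alt string phrase n
instance (string : String) (phrase : String) (n : Int) (out : String) : Decidable (Spec_extract_questions_up_to_nth string phrase n out) := by unfold Spec_extract_questions_up_to_nth; infer_instance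

-- ===== CLAIM (what is proved, stated in full; the proofs are below) =====
def Claim_equal_extract_questions_up_to_nth : Prop := ∀ (string : String) (phrase : String) (n : Int), Dom_extract_questions_up_to_nth string phrase n → Spec_extract_questions_up_to_nth string phrase n (extract_questions_up_to_nth string phrase n)

-- ===== LEMMAS AND PROOFS =====

-- Recursive specification of Python's str.split for nonempty separator: cut at the first
-- occurrence and recurse on the remainder.
def pvSplitRec (sep : List Char) (l : List Char) : List (List Char) :=
  if _h : sep ≠ [] ∧ PySem.Chars.isIn sep l = true then
    l.take (PySem.Chars.find l sep).toNat ::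
      pvSplitRec sep (l.drop ((PySem.Chars.find l sep).toNat + sep.length))
  else [l]
termination_by l.length
decreasing_by
  have hinf : sep <:+: l := (PySem.Chars.isIn_iff_infix sep l).mp _h.2
  have h1 : 1 ≤ sep.length := by
    cases hs : sep with
    | nil => exact absurd hs _h.1
    | cons a t => simp
  have h2 : sep.length ≤ l.length := hinf.length_le
  simp only [List.length_drop]
  omega

theorem pvSplitRec_ne_nil (sep l : List Char) : pvSplitRec sep l ≠ [] := by
  rw [pvSplitRec]
  split <;> simp

-- first-occurrence facts of Chars.find, packaged
theorem pv_find_spec (t sep : List Char) (h : PySem.Chars.find t sep ≠ -1) :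
    sep <+: t.drop (PySem.Chars.find t sep).toNat ∧
      ∀ i, i < (PySem.Chars.find t sep).toNat → ¬ sep <+: t.drop i := by
  have h0 : (0 : Nat) ≤ t.length := Nat.zero_le _
  have := PySem.Chars.findFrom_natCast_spec t sep 0 h0
  simp only [Nat.cast_zero, PySem.Chars.findFrom_zero] at this
  have := this h
  exact ⟨this.2.1, fun i hi => this.2.2 i (Nat.zero_le _) hi⟩

-- A-side loop abstracted to lists: result described as 'take j of the rest' (some j)
-- or 'the whole rest' (none), relative to the current suffix.
def pvRes (sep : List Char) : Nat → List Char → Option Nat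
  | 0, t => if PySem.Chars.find t sep = -1 then none else some (PySem.Chars.find t sep).toNat
  | m + 1, t =>
    if PySem.Chars.find t sep = -1 then some 0
    else (pvRes sep m (t.drop ((PySem.Chars.find t sep).toNat + sep.length))).map
        (fun j => (PySem.Chars.find t sep).toNat + sep.length + j)

def pvF (sep t : List Char) (m : Nat) : List Char :=
  match pvRes sep m t with
  | some j => t.take j
  | none => t

-- B-side selection, phrased on pvSplitRec
def pvSel (sep t : List Char) (m : Nat) : List Char :=
  let parts := pvSplitRec sep t
  let k := parts.length - 1
  if m < k then PySem.Chars.join sep (parts.take (m + 1))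
  else if k = m then t
  else if k = 0 then []
  else PySem.Chars.join sep (parts.take k) ++ sep

theorem pv_join_cons_of_ne_nil (sep a : List Char) (l : List (List Char)) (h : l ≠ []) :
    PySem.Chars.join sep (a :: l) = a ++ sep ++ PySem.Chars.join sep l := by
  cases l with
  | nil => exact absurd rfl h
  | cons b r => rw [PySem.Chars.join_cons_cons]

-- go with no occurrence anywhere: one single piece
theorem pv_go_none (sep : List Char) :
    ∀ (l : List Char) (fuel : Nat) (cur : List Char) (acc : List (List Char)),
      ¬ sep <:+: l →
      PySem.Chars.splitOn.go sep fuel l cur acc = ((cur.reverse ++ l) :: acc).reverse := by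
  intro l
  induction l with
  | nil =>
    intro fuel cur acc _
    cases fuel <;> simp [PySem.Chars.splitOn.go]
  | cons c rest ih =>
    intro fuel cur acc hinf
    cases fuel with
    | zero => simp [PySem.Chars.splitOn.go]
    | succ f =>
      have hpre : sep.isPrefixOf (c :: rest) = false := by
        by_contra hx
        have : sep.isPrefixOf (c :: rest) = true := by
          cases hy : sep.isPrefixOf (c :: rest) <;> simp_all
        exact hinf ((List.isPrefixOf_iff_prefix.mp this).isInfix)
      have hrest : ¬ sep <:+: rest := fun hx => hinf (hx.trans (List.suffix_cons c rest).isInfix)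
      rw [PySem.Chars.splitOn.go, hpre]
      simp only [Bool.false_eq_true, if_false]
      rw [ih f (c :: cur) acc hrest]
      simp

theorem pv_go_step (sep : List Char) (hsep : sep ≠ []) :
    ∀ (j : Nat) (l : List Char) (fuel : Nat) (cur : List Char) (acc : List (List Char)),
      sep <+: l.drop j → (∀ i, i < j → ¬ sep <+: l.drop i) → j + 1 ≤ fuel →
      PySem.Chars.splitOn.go sep fuel l cur acc =
        PySem.Chars.splitOn.go sep (fuel - (j + 1)) (l.drop (j + sep.length)) []
          ((cur.reverse ++ l.take j) :: acc) := by
  intro j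
  induction j with
  | zero =>
    intro l fuel cur acc hp _ hf
    have hl : l ≠ [] := by
      intro he
      subst he
      simp only [List.drop_nil] at hp
      exact hsep (List.prefix_nil.mp hp)
    obtain ⟨c, rest, rfl⟩ := List.exists_cons_of_ne_nil hl
    obtain ⟨f, rfl⟩ : ∃ f, fuel = f + 1 := ⟨fuel - 1, by omega⟩
    have hpre : sep.isPrefixOf (c :: rest) = true :=
      List.isPrefixOf_iff_prefix.mpr (by simpa using hp)
    rw [PySem.Chars.splitOn.go, hpre]
    simp
  | succ j ih =>
    intro l fuel cur acc hp hmin hf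
    have hl : l ≠ [] := by
      intro he
      subst he
      simp only [List.drop_nil] at hp
      exact hsep (List.prefix_nil.mp hp)
    obtain ⟨c, rest, rfl⟩ := List.exists_cons_of_ne_nil hl
    obtain ⟨f, rfl⟩ : ∃ f, fuel = f + 1 := ⟨fuel - 1, by omega⟩
    have hpre : sep.isPrefixOf (c :: rest) = false := by
      by_contra hx
      have hx' : sep.isPrefixOf (c :: rest) = true := by
        cases hy : sep.isPrefixOf (c :: rest) <;> simp_all
      exact hmin 0 (Nat.succ_pos j) (by simpa using List.isPrefixOf_iff_prefix.mp hx')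
    rw [PySem.Chars.splitOn.go, hpre]
    simp only [Bool.false_eq_true, if_false]
    rw [ih rest f (c :: cur) acc (by simpa using hp)
        (fun i hi => by simpa using hmin (i + 1) (by omega)) (by omega)]
    have e1 : (c :: cur).reverse ++ rest.take j = cur.reverse ++ (c :: rest).take (j + 1) := by
      simp
    have e2 : rest.drop (j + sep.length) = (c :: rest).drop (j + 1 + sep.length) := by
      have : j + 1 + sep.length = (j + sep.length) + 1 := by omega
      rw [this]
      simp
    rw [e1, ← e2]
    congr 1
    omega

theorem pv_go_master (sep : List Char) (hsep : sep ≠ []) :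
    ∀ (len : Nat) (l : List Char), l.length ≤ len →
      ∀ (N : Nat) (acc : List (List Char)), l.length + 1 ≤ N →
        PySem.Chars.splitOn.go sep N l [] acc = acc.reverse ++ pvSplitRec sep l := by
  intro len
  induction len with
  | zero =>
    intro l hl N acc hN
    have : l = [] := List.length_eq_zero_iff.mp (by omega)
    subst this
    have hinf : ¬ sep <:+: ([] : List Char) := fun hx => hsep (List.infix_nil.mp hx)
    rw [pv_go_none sep [] N [] acc hinf, pvSplitRec]
    rw [dif_neg]
    · simp
    · rw [not_and_or]
      right
      rw [Bool.not_eq_true, PySem.Chars.isIn_eq_false_iff]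
      exact hinf
  | succ len ih =>
    intro l hl N acc hN
    by_cases hinf : sep <:+: l
    · have hne : PySem.Chars.find l sep ≠ -1 := (PySem.Chars.find_ne_neg_one_iff l sep).mpr hinf
      obtain ⟨hp, hmin⟩ := pv_find_spec l sep hne
      set j := (PySem.Chars.find l sep).toNat with hj
      have hsl : 1 ≤ sep.length := by
        cases hs : sep with
        | nil => exact absurd hs hsep
        | cons a t => simp
      have hjlt : j < l.length := by
        have hne2 : l.drop j ≠ [] := by
          intro he
          rw [he] at hp
          exact hsep (List.prefix_nil.mp hp)
        by_contra hx
        have hxx : l.length ≤ j := by omega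
        exact hne2 (List.drop_eq_nil_of_le hxx)
      rw [pv_go_step sep hsep j l N [] acc hp hmin (by omega)]
      have hlen' : (l.drop (j + sep.length)).length ≤ len := by
        simp only [List.length_drop]
        omega
      have hfuel : (l.drop (j + sep.length)).length + 1 ≤ N - (j + 1) := by
        simp only [List.length_drop]
        omega
      rw [ih (l.drop (j + sep.length)) hlen' (N - (j + 1)) _ hfuel]
      have hguard : sep ≠ [] ∧ PySem.Chars.isIn sep l = true :=
        ⟨hsep, (PySem.Chars.isIn_iff_infix sep l).mpr hinf⟩
      conv_rhs => rw [pvSplitRec]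
      rw [dif_pos hguard]
      simp [← hj, List.reverse_cons, List.append_assoc]
    · rw [pv_go_none sep l N [] acc hinf, pvSplitRec]
      rw [dif_neg]
      · simp
      · rw [not_and_or]
        right
        rw [Bool.not_eq_true, PySem.Chars.isIn_eq_false_iff]
        exact hinf

theorem pv_splitOn_eq (sep l : List Char) (hsep : sep ≠ []) :
    PySem.Chars.splitOn l sep = pvSplitRec sep l := by
  have := pv_go_master sep hsep l.length l le_rfl (l.length + 1) [] le_rfl
  simpa [PySem.Chars.splitOn] using this

-- pvF unfolding step at a found occurrence
theorem pvF_step (sep t : List Char) (m : Nat) (h : PySem.Chars.find t sep ≠ -1) :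
    pvF sep t (m + 1) =
      t.take ((PySem.Chars.find t sep).toNat + sep.length) ++
        pvF sep (t.drop ((PySem.Chars.find t sep).toNat + sep.length)) m := by
  unfold pvF
  rw [pvRes, if_neg h]
  cases hres : pvRes sep m (t.drop ((PySem.Chars.find t sep).toNat + sep.length)) with
  | none => simp [List.take_append_drop]
  | some j => simp [List.take_add]

-- MAIN: the A-side loop abstraction equals the B-side split selection (sep ≠ [])
theorem pv_main_noinf (sep t : List Char) (hinf : ¬ sep <:+: t) (m : Nat) :
    pvF sep t m = pvSel sep t m := by
  have hfind : PySem.Chars.find t sep = -1 := (PySem.Chars.find_eq_neg_one_iff t sep).mpr hinf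
  have hsplit : pvSplitRec sep t = [t] := by
    rw [pvSplitRec, dif_neg]
    rw [not_and_or]
    right
    rw [Bool.not_eq_true, PySem.Chars.isIn_eq_false_iff]
    exact hinf
  cases m with
  | zero => simp [pvF, pvRes, pvSel, hfind, hsplit]
  | succ m => simp [pvF, pvRes, pvSel, hfind, hsplit]

theorem pv_main (sep : List Char) (hsep : sep ≠ []) :
    ∀ (len : Nat) (t : List Char), t.length ≤ len → ∀ (m : Nat),
      pvF sep t m = pvSel sep t m := by
  intro len
  induction len with
  | zero =>
    intro t ht m
    have ht0 : t = [] := List.length_eq_zero_iff.mp (by omega)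
    subst ht0
    exact pv_main_noinf sep [] (fun hx => hsep (List.infix_nil.mp hx)) m
  | succ len ih =>
    intro t ht m
    by_cases hinf : sep <:+: t
    · have hne : PySem.Chars.find t sep ≠ -1 := (PySem.Chars.find_ne_neg_one_iff t sep).mpr hinf
      obtain ⟨hp, _⟩ := pv_find_spec t sep hne
      set j := (PySem.Chars.find t sep).toNat with hj
      set L := sep.length with hL
      have hsl : 1 ≤ L := by
        cases hs : sep with
        | nil => exact absurd hs hsep
        | cons a tl => simp [hL, hs]
      have hjlt : j < t.length := by
        have hne2 : t.drop j ≠ [] := by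
          intro he
          rw [he] at hp
          exact hsep (List.prefix_nil.mp hp)
        by_contra hx
        have hxx : t.length ≤ j := by omega
        exact hne2 (List.drop_eq_nil_of_le hxx)
      have hguard : sep ≠ [] ∧ PySem.Chars.isIn sep t = true :=
        ⟨hsep, (PySem.Chars.isIn_iff_infix sep t).mpr hinf⟩
      have hsplit : pvSplitRec sep t = t.take j :: pvSplitRec sep (t.drop (j + L)) := by
        conv_lhs => rw [pvSplitRec]
        rw [dif_pos hguard]
      set t' := t.drop (j + L) with ht'
      have hih : ∀ m, pvF sep t' m = pvSel sep t' m := by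
        intro m'
        apply ih
        rw [ht']
        simp only [List.length_drop]
        omega
      have hne' : pvSplitRec sep t' ≠ [] := pvSplitRec_ne_nil sep t'
      set parts' := pvSplitRec sep t' with hparts'
      have hlen' : 1 ≤ parts'.length := by
        cases hc : parts' with
        | nil => exact absurd hc hne'
        | cons a r => simp
      set k' := parts'.length - 1 with hk'
      have hkk : parts'.length = k' + 1 := by omega
      have htake : t.take (j + L) = t.take j ++ sep := by
        rw [List.take_add]
        congr 1
        have := List.prefix_iff_eq_take.mp hp
        rw [hL]
        exact this.symm
      have htsum : t.take j ++ sep ++ t' = t := by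
        rw [List.append_assoc, ht']
        conv_rhs => rw [← List.take_append_drop (j + L) t]
        rw [htake, List.append_assoc]
      cases m with
      | zero =>
        have hF : pvF sep t 0 = t.take j := by
          simp [pvF, pvRes, hne, ← hj]
        rw [hF]
        unfold pvSel
        rw [hsplit]
        simp only [List.length_cons, hkk, Nat.add_sub_cancel]
        rw [if_pos (by omega : 0 < k' + 1)]
        simp [PySem.Chars.join_singleton]
      | succ m =>
        have hF : pvF sep t (m + 1) = t.take j ++ sep ++ pvF sep t' m := by
          rw [pvF_step sep t m hne, ← hj, ← hL, ← ht', htake]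
        rw [hF, hih m]
        unfold pvSel
        rw [hsplit]
        simp only [List.length_cons, ← hparts', hkk, Nat.add_sub_cancel]
        by_cases h1 : m < k'
        · rw [if_pos (by omega : m + 1 < k' + 1), if_pos h1]
          have htk : (t.take j :: parts').take (m + 1 + 1) = t.take j :: parts'.take (m + 1) := by
            simp
          rw [htk, pv_join_cons_of_ne_nil]
          intro hx
          rcases List.take_eq_nil_iff.mp hx with h | h
          · omega
          · exact hne' h
        · rw [if_neg (by omega : ¬ m + 1 < k' + 1), if_neg (by omega : ¬ m < k')]
          by_cases h2 : k' = m
          · rw [if_pos (by omega : k' + 1 = m + 1), if_pos h2]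
            exact htsum
          · rw [if_neg (by omega : ¬ k' + 1 = m + 1), if_neg h2,
                if_neg (by omega : ¬ k' + 1 = 0)]
            have htk : (t.take j :: parts').take (k' + 1) = t.take j :: parts'.take k' := by
              simp
            rw [htk]
            by_cases h3 : k' = 0
            · rw [if_pos h3, h3]
              simp [PySem.Chars.join_singleton]
            · rw [if_neg h3]
              rw [pv_join_cons_of_ne_nil]
              · simp [List.append_assoc]
              · intro hx
                rcases List.take_eq_nil_iff.mp hx with h | h
                · exact h3 h
                · exact hne' h
    · exact pv_main_noinf sep t hinf m

-- empty separator: A's scan never advances, every result is take 0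
theorem pvRes_nil (m : Nat) (t : List Char) : pvRes [] m t = some 0 := by
  induction m generalizing t with
  | zero => simp [pvRes, PySem.Chars.find_nil]
  | succ m ih => simp [pvRes, PySem.Chars.find_nil, ih]

-- A-side bridge: the string-level port equals pvF on the suffix
theorem pv_bridge (str p : String) :
    ∀ (m : Nat) (c : Nat), c ≤ str.toList.length →
      pvA_loop str p (c : Int) m =
        String.ofList (str.toList.take c ++ pvF p.toList (str.toList.drop c) m) := by
  intro m
  induction m with
  | zero =>
    intro c hc
    show (if PySem.Str.findFrom str p (c : Int) ≠ -1 then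
        PySem.Str.slice str none (some (PySem.Str.findFrom str p (c : Int))) else str) = _
    rw [PySem.Str.findFrom_eq, PySem.Chars.findFrom_natCast str.toList p.toList c hc]
    by_cases h : PySem.Chars.find (str.toList.drop c) p.toList = -1
    · rw [if_pos h, if_neg (by simp)]
      rw [show pvF p.toList (str.toList.drop c) 0 = str.toList.drop c by
        simp [pvF, pvRes, h]]
      rw [List.take_append_drop, String.ofList_toList]
    · have hr0 : 0 ≤ PySem.Chars.find (str.toList.drop c) p.toList := by
        have := PySem.Chars.neg_one_le_find (str.toList.drop c) p.toList
        omega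
      rw [if_neg h, if_pos (by omega)]
      rw [show pvF p.toList (str.toList.drop c) 0
            = (str.toList.drop c).take (PySem.Chars.find (str.toList.drop c) p.toList).toNat by
        simp [pvF, pvRes, h]]
      simp only [PySem.Str.slice, PySem.Chars.slice_eq_listSlice]
      rw [PySem.List.slice_to _ (by omega)]
      have hto : ((c : Int) + PySem.Chars.find (str.toList.drop c) p.toList).toNat
          = c + (PySem.Chars.find (str.toList.drop c) p.toList).toNat := by omega
      rw [hto, List.take_add]
  | succ m ih =>
    intro c hc
    show (if PySem.Str.findFrom str p (c : Int) = -1 then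
        PySem.Str.slice str none (some (c : Int))
      else pvA_loop str p (PySem.Str.findFrom str p (c : Int) + PySem.Str.len p) m) = _
    rw [PySem.Str.findFrom_eq, PySem.Chars.findFrom_natCast str.toList p.toList c hc]
    by_cases h : PySem.Chars.find (str.toList.drop c) p.toList = -1
    · rw [if_pos (by rw [if_pos h])]
      rw [show pvF p.toList (str.toList.drop c) (m + 1) = [] by
        simp [pvF, pvRes, h]]
      simp only [PySem.Str.slice, PySem.Chars.slice_eq_listSlice]
      rw [PySem.List.slice_to_natCast]
      simp
    · have hr0 : 0 ≤ PySem.Chars.find (str.toList.drop c) p.toList := by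
        have := PySem.Chars.neg_one_le_find (str.toList.drop c) p.toList
        omega
      rw [if_neg (by rw [if_neg h]; omega)]
      rw [if_neg h]
      obtain ⟨rn, hrn⟩ : ∃ rn : Nat, PySem.Chars.find (str.toList.drop c) p.toList = (rn : Int) :=
        ⟨_, (Int.toNat_of_nonneg hr0).symm⟩
      have hplen : PySem.Str.len p = (p.toList.length : Int) := by simp
      have hffne : PySem.Chars.findFrom str.toList p.toList (c : Int) ≠ -1 := by
        rw [PySem.Chars.findFrom_natCast str.toList p.toList c hc, if_neg h, hrn]
        omega
      have hspec := (PySem.Chars.findFrom_natCast_spec str.toList p.toList c hc) hffne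
      have hffto : (PySem.Chars.findFrom str.toList p.toList (c : Int)).toNat = c + rn := by
        rw [PySem.Chars.findFrom_natCast str.toList p.toList c hc, if_neg h, hrn]
        omega
      have hpfx : p.toList <+: str.toList.drop (c + rn) := by
        rw [← hffto]
        exact hspec.2.1
      have hc' : c + rn + p.toList.length ≤ str.toList.length := by
        have h1 := hpfx.length_le
        simp only [List.length_drop] at h1
        have h2 := PySem.Chars.find_le_length (str.toList.drop c) p.toList
        rw [hrn] at h2
        simp only [List.length_drop] at h2
        omega
      have he : (c : Int) + PySem.Chars.find (str.toList.drop c) p.toList + PySem.Str.len p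
          = ((c + rn + p.toList.length : Nat) : Int) := by
        rw [hrn, hplen]
        push_cast
        ring
      rw [he, ih (c + rn + p.toList.length) hc']
      rw [show pvF p.toList (str.toList.drop c) (m + 1)
            = (str.toList.drop c).take (rn + p.toList.length) ++
              pvF p.toList ((str.toList.drop c).drop (rn + p.toList.length)) m by
        have hx := pvF_step p.toList (str.toList.drop c) m h
        rw [hrn] at hx
        simpa using hx]
      have hdd : (str.toList.drop c).drop (rn + p.toList.length)
          = str.toList.drop (c + rn + p.toList.length) := by
        rw [List.drop_drop]
        congr 1
        omega
      have hta : str.toList.take (c + rn + p.toList.length)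
          = str.toList.take c ++ (str.toList.drop c).take (rn + p.toList.length) := by
        rw [show c + rn + p.toList.length = c + (rn + p.toList.length) by omega, List.take_add]
      rw [hdd, hta]
      simp [List.append_assoc]

-- ===== VERDICT (by name: the statement is the Claim_ definition above) =====
theorem extract_questions_up_to_nth_spec : Claim_equal_extract_questions_up_to_nth := by
  unfold Claim_equal_extract_questions_up_to_nth
  intro str p n _
  unfold Spec_extract_questions_up_to_nth extract_questions_up_to_nth extract_questions_up_to_nth_alt
  have hbridge := pv_bridge str p n.toNat 0 (Nat.zero_le _)
  simp only [Nat.cast_zero, List.take_zero, List.drop_zero, List.nil_append] at hbridge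
  by_cases hp : p = ""
  · subst hp
    rw [if_pos (by simp)]
    rw [hbridge]
    rw [show pvF "".toList str.toList n.toNat = [] by
      simp [pvF, pvRes_nil]]
  · rw [if_neg (by simpa using hp)]
    have hsep : p.toList ≠ [] := by
      intro he
      exact hp (by simpa using congrArg String.ofList he)
    rw [hbridge, pv_main p.toList hsep str.toList.length str.toList le_rfl n.toNat]
    unfold pvSel
    rw [pv_splitOn_eq p.toList str.toList hsep]
    set parts := pvSplitRec p.toList str.toList with hparts
    have hne : parts ≠ [] := pvSplitRec_ne_nil p.toList str.toList
    have hlen : 1 ≤ parts.length := by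
      cases hc : parts with
      | nil => exact absurd hc hne
      | cons a r => simp
    set m := n.toNat with hm
    set k := parts.length - 1 with hk
    have hmax : max n 0 = ((m : Nat) : Int) := by omega
    have hkc : (parts.length : Int) - 1 = ((k : Nat) : Int) := by omega
    by_cases h1 : m < k
    · rw [if_pos h1, if_pos (by omega : (parts.length : Int) - 1 > max n 0)]
      rw [hmax]
      rw [show ((m : Nat) : Int) + 1 = (((m + 1 : Nat)) : Int) by omega]
      rw [PySem.List.slice_to_natCast]
    · rw [if_neg h1, if_neg (by omega : ¬ (parts.length : Int) - 1 > max n 0)]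
      by_cases h2 : k = m
      · rw [if_pos h2, if_pos (by omega : (parts.length : Int) - 1 = max n 0)]
        exact String.ofList_toList
      · rw [if_neg h2, if_neg (by omega : ¬ (parts.length : Int) - 1 = max n 0)]
        by_cases h3 : k = 0
        · rw [if_pos h3, if_pos (by omega : (parts.length : Int) - 1 = 0)]
        · rw [if_neg h3, if_neg (by omega : ¬ (parts.length : Int) - 1 = 0)]
          rw [hkc, PySem.List.slice_to_natCast]
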